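-- pv_equiv track=rewrite | github.com/sthunquest/MTGScraper | Scraper.py | extractMana
-- ===== SOURCE A (Python) =====
-- def extractMana(focusGroup):
--     manaCost = []
--     tag = r'alt="'
--     endTag = r'"'
--     if focusGroup.find(tag) != -1:
--         startCapture = focusGroup.find(tag)+len(tag)
--         stopCapture = focusGroup[startCapture:].find(endTag)
--         add = focusGroup[startCapture:startCapture+stopCapture]
--         manaCost.insert(len(manaCost), add)
--         manaCost += extractMana(focusGroup[startCapture+stopCapture+len(endTag):])
--     return manaCost
-- ===== SOURCE B (Python) =====
-- def extractMana(focusGroup):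
--     # Iterative re-implementation: one while loop over a shrinking suffix,
--     # same slice arithmetic as the recursive original (incl. the stop == -1 case).
--     manaCost = []
--     tag = r'alt="'
--     endTag = r'"'
--     s = focusGroup
--     while s.find(tag) != -1:
--         start = s.find(tag) + len(tag)
--         stop = s[start:].find(endTag)
--         manaCost.append(s[start:start+stop])
--         s = s[start+stop+len(endTag):]
--     return manaCost
-- ===== Notes on version B (the rewrite author's own statement) =====
-- stated objective: simpler
-- what changed: Replaces the non-tail recursion (each level building a list and concatenating the recursive result) with a single iterative while-loop over a shrinking suffix that appends to one accumulator list; it also avoids Python's recursion-depth limit on inputs with very many tags.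
import Mathlib
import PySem

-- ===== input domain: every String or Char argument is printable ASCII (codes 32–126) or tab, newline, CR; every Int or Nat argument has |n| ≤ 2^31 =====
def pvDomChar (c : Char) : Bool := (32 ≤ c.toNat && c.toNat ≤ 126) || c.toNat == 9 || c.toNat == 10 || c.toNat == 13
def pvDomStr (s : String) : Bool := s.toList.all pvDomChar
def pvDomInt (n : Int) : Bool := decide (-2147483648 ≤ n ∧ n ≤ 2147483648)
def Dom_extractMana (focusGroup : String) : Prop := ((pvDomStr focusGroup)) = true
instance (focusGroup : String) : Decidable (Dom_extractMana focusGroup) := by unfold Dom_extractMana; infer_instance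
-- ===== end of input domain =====

-- B replaces A's non-tail recursion with one iterative loop (tail recursion over a
-- shrinking suffix with an accumulator); same slice arithmetic, same output.


-- ===== PORT A =====
-- tag = 'alt="' (len 5), endTag = '"'
def pvTag : List Char := ['a', 'l', 't', '=', '"']
def pvEnd : List Char := ['"']

-- termination fact both recursions need: the suffix s[start+stop+1:] is strictly shorter
theorem pvStep_lt (s : List Char) (h : PySem.Chars.find s pvTag ≠ -1) :
    (PySem.List.slice s (some (PySem.Chars.find s pvTag + 5 +
      PySem.Chars.find (PySem.List.slice s (some (PySem.Chars.find s pvTag + 5)) none) pvEnd + 1))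
      none).length < s.length := by
  have hf0 : 0 ≤ PySem.Chars.find s pvTag := by
    have := PySem.Chars.neg_one_le_find s pvTag
    omega
  have hinf : pvTag <:+: s := (PySem.Chars.find_ne_neg_one_iff s pvTag).mp h
  have hlen : 5 ≤ s.length := by
    have := hinf.length_le
    simpa [pvTag] using this
  have hstop : -1 ≤ PySem.Chars.find
      (PySem.List.slice s (some (PySem.Chars.find s pvTag + 5)) none) pvEnd :=
    PySem.Chars.neg_one_le_find _ _
  set a : Int := PySem.Chars.find s pvTag + 5 +
      PySem.Chars.find (PySem.List.slice s (some (PySem.Chars.find s pvTag + 5)) none) pvEnd + 1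
    with ha
  have ha0 : 0 ≤ a := by omega
  rw [PySem.List.slice_from s ha0]
  have h5 : 5 ≤ a.toNat := by omega
  simp only [List.length_drop]
  omega

-- literal transliteration of A: recursion, one capture per level, '::' for the
-- insert-then-extend of the Python
def extractManaL (s : List Char) : List String :=
  if h : PySem.Chars.find s pvTag ≠ -1 then
    let startCapture := PySem.Chars.find s pvTag + 5
    let stopCapture := PySem.Chars.find (PySem.List.slice s (some startCapture) none) pvEnd
    let add := PySem.List.slice s (some startCapture) (some (startCapture + stopCapture))
    String.ofList add :: extractManaL (PySem.List.slice s (some (startCapture + stopCapture + 1)) none)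
  else []
termination_by s.length
decreasing_by exact pvStep_lt s h

def extractMana (focusGroup : String) : List String :=
  extractManaL focusGroup.toList

-- ===== PORT B =====
-- the while-loop of Source B: state = (remaining suffix s, accumulator manaCost)
def extractManaLoop (s : List Char) (manaCost : List String) : List String :=
  if h : PySem.Chars.find s pvTag ≠ -1 then
    let start := PySem.Chars.find s pvTag + 5
    let stop := PySem.Chars.find (PySem.List.slice s (some start) none) pvEnd
    extractManaLoop (PySem.List.slice s (some (start + stop + 1)) none)
      (manaCost ++ [String.ofList (PySem.List.slice s (some start) (some (start + stop)))])
  else manaCost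
termination_by s.length
decreasing_by exact pvStep_lt s h

def extractMana_alt (focusGroup : String) : List String :=
  extractManaLoop focusGroup.toList []

-- ===== PRECONDITION & SPEC =====
def Spec_extractMana (focusGroup : String) (out : List String) : Prop := out = extractMana_alt focusGroup
instance (focusGroup : String) (out : List String) : Decidable (Spec_extractMana focusGroup out) := by unfold Spec_extractMana; infer_instance

-- ===== CLAIM (what is proved, stated in full; the proofs are below) =====
def Claim_equal_extractMana : Prop := ∀ (focusGroup : String), Dom_extractMana focusGroup → Spec_extractMana focusGroup (extractMana focusGroup)

-- ===== LEMMAS AND PROOFS =====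
-- loop invariant: the tail-recursive loop prepends its accumulator to A's result
theorem extractManaLoop_eq (s : List Char) (acc : List String) :
    extractManaLoop s acc = acc ++ extractManaL s := by
  rw [extractManaLoop, extractManaL]
  by_cases h : PySem.Chars.find s pvTag ≠ -1
  · simp only [dif_pos h]
    rw [extractManaLoop_eq]
    simp
  · simp [dif_neg h]
termination_by s.length
decreasing_by exact pvStep_lt s h

-- ===== VERDICT (by name: the statement is the Claim_ definition above) =====
theorem extractMana_spec : Claim_equal_extractMana := by
  intro focusGroup _
  unfold Spec_extractMana extractMana extractMana_alt
  rw [extractManaLoop_eq]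
  simp
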